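-- pv_equiv track=rewrite | github.com/hwang018/Leetcode | 1370. Increasing Decreasing String/.ipynb_checkpoints/solution-checkpoint.py | sortString
-- ===== SOURCE A (Python) =====
-- def sortString(s: str) -> str:
--     res = []
--     s_list = list(s)
--
--     i=0
--     while len(s_list) > 0:
--         if i%2==0:
--             temp = list(set(s_list))
--             temp.sort()
--             res+=temp
--             for v in temp:
--                 s_list.remove(v)
--             i+=1
--         else:
--             temp = list(set(s_list))
--             temp.sort(reverse=True)
--             res+=temp
--             for v in temp:
--                 s_list.remove(v)
--             i+=1
--     return "".join(res)
-- ===== SOURCE B (Python) =====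
-- def sortString(s: str) -> str:
--     counts = {}
--     for ch in s:
--         counts[ch] = counts.get(ch, 0) + 1
--     letters = sorted(counts)
--     out = []
--     remaining = len(s)
--     asc = True
--     while remaining > 0:
--         for ch in (letters if asc else reversed(letters)):
--             if counts[ch] > 0:
--                 counts[ch] -= 1
--                 out.append(ch)
--                 remaining -= 1
--         asc = not asc
--     return "".join(out)
-- ===== Notes on version B (the rewrite author's own statement) =====
-- stated objective: faster
-- what changed: Instead of repeatedly rebuilding set(s_list), sorting it and removing one occurrence of each character from the list (a quadratic remove/sort loop), B counts frequencies once, sorts the distinct letters once, and then emits alternating forward/backward sweeps over that fixed sorted list, decrementing counts.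
import Mathlib
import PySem

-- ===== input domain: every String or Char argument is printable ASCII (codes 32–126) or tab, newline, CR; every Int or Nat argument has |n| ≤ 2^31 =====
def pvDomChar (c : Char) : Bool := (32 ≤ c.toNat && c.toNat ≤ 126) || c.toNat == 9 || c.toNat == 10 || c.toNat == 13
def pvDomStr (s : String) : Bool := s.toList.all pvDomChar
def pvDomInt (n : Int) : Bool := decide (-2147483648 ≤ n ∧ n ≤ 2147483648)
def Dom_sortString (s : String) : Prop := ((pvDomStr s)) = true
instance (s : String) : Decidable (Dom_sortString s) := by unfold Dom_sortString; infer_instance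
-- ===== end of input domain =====

-- B replaces A's repeated set/sort/remove rounds by one frequency count plus alternating sweeps
-- over the sorted distinct letters (objective: faster; return value only, no observable mutation).

-- ===== PORT A =====
-- the while loop of A; fuel only makes the recursion structural (each round shortens s_list)
def sortStringLoop : Nat → List Char → List Char → Int → List Char
  | 0, res, _, _ => res
  | fuel+1, res, s_list, i =>
    if s_list.length > 0 then
      if PySem.Int.mod i 2 == 0 then
        let temp := PySem.List.sorted (PySem.Set.ofList s_list) (fun x => x) false
        let res' := res ++ temp
        let s_list' := temp.foldl (fun acc v => (PySem.List.remove? acc v).getD acc) s_list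
        sortStringLoop fuel res' s_list' (i + 1)
      else
        let temp := PySem.List.sorted (PySem.Set.ofList s_list) (fun x => x) true
        let res' := res ++ temp
        let s_list' := temp.foldl (fun acc v => (PySem.List.remove? acc v).getD acc) s_list
        sortStringLoop fuel res' s_list' (i + 1)
    else res

def sortString (s : String) : String :=
  String.mk (sortStringLoop (s.toList.length + 1) [] s.toList 0)

-- ===== PORT B =====
-- one pass of the inner 'for ch in order' loop body
def sweepStep (st : PySem.Dict Char Int × List Char × Int) (ch : Char) :
    PySem.Dict Char Int × List Char × Int :=
  let (counts, out, remaining) := st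
  if 0 < counts.getD ch 0 then
    (counts.insert ch (counts.getD ch 0 - 1), out ++ [ch], remaining - 1)
  else
    (counts, out, remaining)

def sortStringAltLoop : Nat → PySem.Dict Char Int → List Char → List Char → Int → Bool → List Char
  | 0, _, _, out, _, _ => out
  | fuel+1, counts, letters, out, remaining, asc =>
    if remaining > 0 then
      let st := (if asc then letters else letters.reverse).foldl sweepStep (counts, out, remaining)
      sortStringAltLoop fuel st.1 letters st.2.1 st.2.2 (!asc)
    else out

def sortString_alt (s : String) : String :=
  let counts := s.toList.foldl (fun d ch => d.insert ch (d.getD ch 0 + 1)) PySem.Dict.empty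
  let letters := PySem.List.sorted counts.keys (fun x => x) false
  String.mk (sortStringAltLoop (s.toList.length + 1) counts letters [] (s.toList.length : Int) true)

-- ===== PRECONDITION & SPEC =====
def Spec_sortString (s : String) (out : String) : Prop := out = sortString_alt s
instance (s : String) (out : String) : Decidable (Spec_sortString s out) := by unfold Spec_sortString; infer_instance

-- ===== CLAIM (what is proved, stated in full; the proofs are below) =====
def Claim_equal_sortString : Prop := ∀ (s : String), Dom_sortString s → Spec_sortString s (sortString s)

-- ===== LEMMAS AND PROOFS =====

theorem sweep_fold (order : List Char) (hnd : order.Nodup) :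
    ∀ (c : PySem.Dict Char Int) (o : List Char) (r : Int),
      (order.foldl sweepStep (c, o, r)).2.1 = o ++ order.filter (fun ch => decide (0 < c.getD ch 0)) ∧
      (order.foldl sweepStep (c, o, r)).2.2 = r - (order.filter (fun ch => decide (0 < c.getD ch 0))).length ∧
      ∀ ch, (order.foldl sweepStep (c, o, r)).1.getD ch 0 =
        if ch ∈ order ∧ 0 < c.getD ch 0 then c.getD ch 0 - 1 else c.getD ch 0 := by
  induction order with
  | nil => intro c o r; simp
  | cons a t ih =>
    intro c o r
    have hnd' : t.Nodup := hnd.of_cons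
    have ha : a ∉ t := (List.nodup_cons.mp hnd).1
    by_cases h : 0 < c.getD a 0
    · have hstep : sweepStep (c, o, r) a =
        (c.insert a (c.getD a 0 - 1), o ++ [a], r - 1) := by simp [sweepStep, h]
      have hfilter : t.filter (fun ch => decide (0 < (c.insert a (c.getD a 0 - 1)).getD ch 0)) =
          t.filter (fun ch => decide (0 < c.getD ch 0)) := by
        apply List.filter_congr
        intro ch hch
        have : ch ≠ a := fun e => ha (e ▸ hch)
        simp [PySem.Dict.getD_insert, this]
      obtain ⟨h1, h2, h3⟩ := ih hnd' (c.insert a (c.getD a 0 - 1)) (o ++ [a]) (r - 1)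
      refine ⟨?_, ?_, ?_⟩
      · simp only [List.foldl_cons, hstep, h1, hfilter]
        simp [h]
      · simp only [List.foldl_cons, hstep, h2, hfilter]
        simp [h]; ring
      · intro ch
        simp only [List.foldl_cons, hstep, h3 ch]
        by_cases hca : ch = a
        · subst hca
          simp [PySem.Dict.getD_insert_self, ha, h]
        · rw [PySem.Dict.getD_insert]; simp only [if_neg hca]
          simp [List.mem_cons, hca]
    · have hstep : sweepStep (c, o, r) a = (c, o, r) := by simp [sweepStep, h]
      obtain ⟨h1, h2, h3⟩ := ih hnd' c o r
      refine ⟨?_, ?_, ?_⟩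
      · simp only [List.foldl_cons, hstep, h1]
        simp [h]
      · simp only [List.foldl_cons, hstep, h2]
        simp [h]
      · intro ch
        simp only [List.foldl_cons, hstep, h3 ch]
        by_cases hca : ch = a
        · subst hca; simp [h]
        · simp [List.mem_cons, hca]

theorem remove_fold (temp : List Char) (hnd : temp.Nodup) :
    ∀ (acc : List Char), (∀ v ∈ temp, v ∈ acc) →
      (∀ ch, ((temp.foldl (fun acc v => (PySem.List.remove? acc v).getD acc) acc).count ch : Int) =
        (acc.count ch : Int) - (if ch ∈ temp then 1 else 0)) ∧
      (temp.foldl (fun acc v => (PySem.List.remove? acc v).getD acc) acc).length + temp.length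
        = acc.length := by
  induction temp with
  | nil => intro acc _; simp
  | cons a t ih =>
    intro acc hmem
    have ha : a ∉ t := (List.nodup_cons.mp hnd).1
    have haacc : a ∈ acc := hmem a (List.mem_cons_self)
    have hstep : (PySem.List.remove? acc a).getD acc = acc.erase a := by
      rw [PySem.List.remove?_eq_some_erase _ _ haacc]; rfl
    have hmem' : ∀ v ∈ t, v ∈ acc.erase a := by
      intro v hv
      exact (List.mem_erase_of_ne (fun (e : v = a) => ha (e ▸ hv))).mpr (hmem v (List.mem_cons_of_mem a hv))
    obtain ⟨h1, h2⟩ := ih hnd.of_cons (acc.erase a) hmem'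
    constructor
    · intro ch
      simp only [List.foldl_cons, hstep, h1 ch]
      by_cases hca : ch = a
      · subst hca
        have : acc.count ch - 1 + 1 = acc.count ch :=
          Nat.sub_add_cancel (List.count_pos_iff.mpr haacc)
        simp [List.count_erase_self, ha, List.mem_cons]
        omega
      · simp [List.count_erase_of_ne hca, List.mem_cons, hca]
    · have hl := List.length_erase_of_mem haacc
      have hp : 0 < acc.length := List.length_pos_of_mem haacc
      rw [List.foldl_cons, hstep, List.length_cons]
      omega


theorem loop_eq (letters : List Char) (hlet : letters.Pairwise (· < ·)) :
    ∀ (fuel : Nat) (s_list : List Char) (counts : PySem.Dict Char Int)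
      (res : List Char) (i : Int) (asc : Bool),
      s_list.length ≤ fuel →
      (∀ ch, counts.getD ch 0 = (s_list.count ch : Int)) →
      (∀ ch ∈ s_list, ch ∈ letters) →
      ((PySem.Int.mod i 2 == 0) = asc) →
      sortStringLoop fuel res s_list i =
        sortStringAltLoop fuel counts letters res (s_list.length : Int) asc := by
  intro fuel
  induction fuel with
  | zero => intro s_list counts res i asc _ _ _ _; rfl
  | succ fuel ih =>
    intro s_list counts res i asc hfuel hc hsup hpar
    by_cases hlen : s_list.length > 0
    · -- shared facts
      have hFc : letters.filter (fun ch => decide (0 < counts.getD ch 0)) =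
          letters.filter (fun ch => decide (0 < s_list.count ch)) := by
        apply List.filter_congr
        intro ch _
        rw [hc ch]
        simp
      set F := letters.filter (fun ch => decide (0 < s_list.count ch)) with hF
      have hFmem : ∀ ch, ch ∈ F ↔ ch ∈ s_list := by
        intro ch
        rw [hF, List.mem_filter]
        constructor
        · rintro ⟨-, h⟩; exact List.count_pos_iff.mp (by simpa using h)
        · intro h; exact ⟨hsup ch h, by simp [List.count_pos_iff.mpr h]⟩
      have hFpw : F.Pairwise (· < ·) := List.Pairwise.sublist List.filter_sublist hlet
      have hFnd : F.Nodup := hFpw.imp ne_of_lt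
      have hperm : F.Perm (PySem.Set.ofList s_list) :=
        (List.perm_ext_iff_of_nodup hFnd (PySem.Set.nodup_ofList s_list)).mpr
          (fun a => by rw [hFmem a, PySem.Set.mem_ofList])
      have htempA : PySem.List.sorted (PySem.Set.ofList s_list) (fun x => x) false = F :=
        PySem.List.sorted_eq_of_perm_of_pairwise_lt _ _ _ hperm hFpw
      have htempD : PySem.List.sorted (PySem.Set.ofList s_list) (fun x => x) true = F.reverse :=
        PySem.List.sorted_rev_eq_of_perm_of_pairwise_gt _ _ _
          ((F.reverse_perm).trans hperm) (List.pairwise_reverse.mpr hFpw)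
      have hFne : F ≠ [] := by
        obtain ⟨ch, hch⟩ := List.exists_mem_of_length_pos hlen
        exact List.ne_nil_of_mem ((hFmem ch).mpr hch)
      have hFmemlist : ∀ v ∈ F, v ∈ s_list := fun v hv => (hFmem v).mp hv
      -- the removal facts, for temp = F and temp = F.reverse
      obtain ⟨hrc, hrl⟩ := remove_fold F hFnd s_list hFmemlist
      have hFrnd : F.reverse.Nodup := List.nodup_reverse.mpr hFnd
      obtain ⟨hrc', hrl'⟩ := remove_fold F.reverse hFrnd s_list
        (fun v hv => hFmemlist v (List.mem_reverse.mp hv))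
      -- parity step
      have hmodlt := PySem.Int.mod_lt i (b := 2) (by norm_num)
      have hmodnn := PySem.Int.mod_nonneg i (b := 2) (by norm_num)
      have hmod1 : PySem.Int.mod (i+1) 2 = 1 - PySem.Int.mod i 2 := by
        rw [PySem.Int.mod_eq_emod_of_pos (by norm_num), PySem.Int.mod_eq_emod_of_pos (by norm_num)]
        omega
      have e1 : PySem.Int.mod i 2 = i % 2 := PySem.Int.mod_eq_emod_of_pos (by norm_num)
      have hpar' : (PySem.Int.mod (i+1) 2 == 0) = !asc := by
        rw [← hpar, hmod1, e1]
        rcases Int.emod_two_eq i with h | h <;> rw [h] <;> decide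
      have hlenI : (0:Int) < (s_list.length : Int) := by exact_mod_cast hlen
      have hletnd : letters.Nodup := hlet.imp ne_of_lt
      have hFpos : 0 < F.length := List.length_pos_of_ne_nil hFne
      cases asc with
      | true =>
        obtain ⟨hs1, hs2, hs3⟩ := sweep_fold letters hletnd counts res (s_list.length : Int)
        rw [hFc] at hs1 hs2
        set s_list' := F.foldl (fun acc v => (PySem.List.remove? acc v).getD acc) s_list with hsl'
        have hcond : PySem.Int.mod i 2 == 0 := by rw [hpar]
        have stepA : sortStringLoop (fuel+1) res s_list i =
            sortStringLoop fuel (res ++ F) s_list' (i + 1) := by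
          rw [sortStringLoop]
          rw [if_pos hlen, if_pos hcond, htempA]
        have stepB : sortStringAltLoop (fuel+1) counts letters res (s_list.length : Int) true =
            sortStringAltLoop fuel (letters.foldl sweepStep (counts, res, (s_list.length:Int))).1
              letters (res ++ F) ((s_list.length : Int) - F.length) false := by
          rw [sortStringAltLoop]
          rw [if_pos hlenI]
          simp only [Bool.not_true, if_true]
          rw [hs1, hs2]
        rw [stepA, stepB]
        have hlen' : (s_list'.length : Int) = (s_list.length : Int) - F.length := by
          omega
        rw [← hlen']
        apply ih
        · omega
        · intro ch
          rw [hs3 ch, hrc ch]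
          have hmF : ch ∈ F ↔ ch ∈ letters ∧ 0 < counts.getD ch 0 := by
            rw [hF, List.mem_filter, hc ch]
            simp
          by_cases hchF : ch ∈ F
          · rw [if_pos (hmF.mp hchF), if_pos hchF, hc ch]
          · rw [if_neg (fun hcon => hchF (hmF.mpr hcon)), if_neg hchF, hc ch]
            ring
        · intro ch hch
          have h1 : 0 < List.count ch s_list' := List.count_pos_iff.mpr hch
          have h2 := hrc ch
          have h3 : 0 < List.count ch s_list := by
            by_cases hchF : ch ∈ F
            · exact List.count_pos_iff.mpr ((hFmem ch).mp hchF)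
            · rw [if_neg hchF] at h2; omega
          exact hsup ch (List.count_pos_iff.mp h3)
        · exact hpar'
      | false =>
        obtain ⟨hs1, hs2, hs3⟩ := sweep_fold letters.reverse (List.nodup_reverse.mpr hletnd)
          counts res (s_list.length : Int)
        have hfr : letters.reverse.filter (fun ch => decide (0 < counts.getD ch 0)) = F.reverse := by
          rw [List.filter_reverse, hFc]
        rw [hfr] at hs1 hs2
        set s_list' := F.reverse.foldl (fun acc v => (PySem.List.remove? acc v).getD acc) s_list
          with hsl'
        have hcond : (PySem.Int.mod i 2 == 0) = false := by rw [hpar]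
        have stepA : sortStringLoop (fuel+1) res s_list i =
            sortStringLoop fuel (res ++ F.reverse) s_list' (i + 1) := by
          rw [sortStringLoop]
          rw [if_pos hlen, hcond]
          simp only [Bool.false_eq_true, if_false]
          rw [htempD]
        have stepB : sortStringAltLoop (fuel+1) counts letters res (s_list.length : Int) false =
            sortStringAltLoop fuel (letters.reverse.foldl sweepStep (counts, res, (s_list.length:Int))).1
              letters (res ++ F.reverse) ((s_list.length : Int) - F.reverse.length) true := by
          rw [sortStringAltLoop]
          rw [if_pos hlenI]
          simp only [Bool.not_false]
          rw [if_neg (by simp), hs1, hs2]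
        rw [stepA, stepB]
        have hlen' : (s_list'.length : Int) = (s_list.length : Int) - F.reverse.length := by
          omega
        rw [← hlen']
        apply ih
        · have := List.length_reverse (as := F)
          omega
        · intro ch
          rw [hs3 ch, hrc' ch]
          have hmF : ch ∈ F.reverse ↔ ch ∈ letters.reverse ∧ 0 < counts.getD ch 0 := by
            rw [List.mem_reverse, List.mem_reverse, hF, List.mem_filter, hc ch]
            simp
          by_cases hchF : ch ∈ F.reverse
          · rw [if_pos (hmF.mp hchF), if_pos hchF, hc ch]
          · rw [if_neg (fun hcon => hchF (hmF.mpr hcon)), if_neg hchF, hc ch]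
            ring
        · intro ch hch
          have h1 : 0 < List.count ch s_list' := List.count_pos_iff.mpr hch
          have h2 := hrc' ch
          have h3 : 0 < List.count ch s_list := by
            by_cases hchF : ch ∈ F.reverse
            · exact List.count_pos_iff.mpr ((hFmem ch).mp (List.mem_reverse.mp hchF))
            · rw [if_neg hchF] at h2; omega
          exact hsup ch (List.count_pos_iff.mp h3)
        · exact hpar'
    · -- empty list: both loops return the accumulator
      have h0 : s_list.length = 0 := by omega
      simp [sortStringLoop, sortStringAltLoop, h0]

theorem sortString_spec : Claim_equal_sortString := by
  intro s _
  unfold Spec_sortString sortString sortString_alt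
  simp only []
  show String.mk _ = String.mk _
  apply congrArg
  apply loop_eq
  · rw [PySem.Dict.keys_foldl_insert]
    exact PySem.List.sorted_ofList_pairwise_lt s.toList
  · exact Nat.le_succ _
  · intro ch
    rw [PySem.Dict.getD_foldl_insert_add_one]
    simp
  · intro ch hch
    rw [PySem.List.mem_sorted, PySem.Dict.keys_foldl_insert]
    show ch ∈ PySem.Set.ofList s.toList
    rw [PySem.Set.mem_ofList]
    exact hch
  · decide
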